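-- pv_equiv track=rewrite | github.com/anorien90/gopilot | gopilot/handlers.py | _get_language_from_uri
-- ===== SOURCE A (Python) =====
-- def _get_language_from_uri(uri: str) -> str:
--     """
--     Detect programming language from file extension.
--
--     Args:
--         uri: Document URI
--
--     Returns:
--         Language identifier
--     """
--     ext_map = {
--         ".py": "python",
--         ".js": "javascript",
--         ".ts": "typescript",
--         ".jsx": "javascript",
--         ".tsx": "typescript",
--         ".go": "go",
--         ".rs": "rust",
--         ".java": "java",
--         ".c": "c",
--         ".cpp": "cpp",
--         ".h": "c",
--         ".hpp": "cpp",
--         ".rb": "ruby",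
--         ".php": "php",
--         ".lua": "lua",
--         ".sh": "bash",
--         ".bash": "bash",
--         ".zsh": "zsh",
--         ".sql": "sql",
--         ".html": "html",
--         ".css": "css",
--         ".json": "json",
--         ".yaml": "yaml",
--         ".yml": "yaml",
--         ".md": "markdown",
--         ".toml": "toml",
--     }
--     for ext, lang in ext_map.items():
--         if uri.endswith(ext):
--             return lang
--     return "text"
-- ===== SOURCE B (Python) =====
-- def _get_language_from_uri(uri: str) -> str:
--     """Find the last '.' once with rfind, then map that exact suffix through an if/elif chain."""
--     idx = uri.rfind(".")
--     if idx == -1: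
--         return "text"
--     ext = uri[idx:]
--     if ext == ".py": return "python"
--     elif ext == ".js": return "javascript"
--     elif ext == ".ts": return "typescript"
--     elif ext == ".jsx": return "javascript"
--     elif ext == ".tsx": return "typescript"
--     elif ext == ".go": return "go"
--     elif ext == ".rs": return "rust"
--     elif ext == ".java": return "java"
--     elif ext == ".c": return "c"
--     elif ext == ".cpp": return "cpp"
--     elif ext == ".h": return "c"
--     elif ext == ".hpp": return "cpp"
--     elif ext == ".rb": return "ruby"
--     elif ext == ".php": return "php"
--     elif ext == ".lua": return "lua"
--     elif ext == ".sh": return "bash"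
--     elif ext == ".bash": return "bash"
--     elif ext == ".zsh": return "zsh"
--     elif ext == ".sql": return "sql"
--     elif ext == ".html": return "html"
--     elif ext == ".css": return "css"
--     elif ext == ".json": return "json"
--     elif ext == ".yaml": return "yaml"
--     elif ext == ".yml": return "yaml"
--     elif ext == ".md": return "markdown"
--     elif ext == ".toml": return "toml"
--     else: return "text"
-- ===== Notes on version B (the rewrite author's own statement) =====
-- stated objective: alternative
-- what changed: A tests uri.endswith(ext) against all 26 dict keys in order; B locates the last dot once with rfind, slices off that exact suffix, and maps it through a direct extension-to-language if/elif chain with the same fallback (correct because every key starts with a dot and contains no other dot, so the only key that can be a suffix of uri is the last-dot suffix).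
import Mathlib
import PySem

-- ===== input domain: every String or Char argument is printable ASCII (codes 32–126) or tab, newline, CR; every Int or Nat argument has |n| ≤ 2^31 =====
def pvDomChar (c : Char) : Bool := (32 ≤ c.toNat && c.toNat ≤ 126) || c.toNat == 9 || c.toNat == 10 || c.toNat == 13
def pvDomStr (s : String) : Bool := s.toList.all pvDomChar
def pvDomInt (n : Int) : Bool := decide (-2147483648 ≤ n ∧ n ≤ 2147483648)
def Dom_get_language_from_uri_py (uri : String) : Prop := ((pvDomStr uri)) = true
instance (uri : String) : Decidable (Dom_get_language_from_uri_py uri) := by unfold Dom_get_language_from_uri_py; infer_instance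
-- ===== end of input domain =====

-- B replaces A's endswith-scan over the 26 dict keys by one rfind('.'), slicing off the
-- exact last-dot suffix, and a direct extension->language decision chain (objective: alternative).

-- ===== PORT A =====
-- A's dict literal ext_map (insertion order)
def pvAMap : PySem.Dict String String := PySem.Dict.mk
  [(".py", "python"), (".js", "javascript"), (".ts", "typescript"), (".jsx", "javascript"),
   (".tsx", "typescript"), (".go", "go"), (".rs", "rust"), (".java", "java"), (".c", "c"),
   (".cpp", "cpp"), (".h", "c"), (".hpp", "cpp"), (".rb", "ruby"), (".php", "php"),
   (".lua", "lua"), (".sh", "bash"), (".bash", "bash"), (".zsh", "zsh"), (".sql", "sql"),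
   (".html", "html"), (".css", "css"), (".json", "json"), (".yaml", "yaml"), (".yml", "yaml"),
   (".md", "markdown"), (".toml", "toml")]

-- A's loop over ext_map.items(): return the first lang whose ext is a suffix of uri
def pvAScan (uri : String) : List (String × String) → String
  | [] => "text"
  | (ext, lang) :: rest => if PySem.Str.endswith uri ext then lang else pvAScan uri rest

def get_language_from_uri_py (uri : String) : String := pvAScan uri pvAMap.items

-- ===== PORT B =====
-- Source B's if/elif chain on the extension
def pvLang (ext : String) : String :=
  if ext == ".py" then "python"
  else if ext == ".js" then "javascript"
  else if ext == ".ts" then "typescript"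
  else if ext == ".jsx" then "javascript"
  else if ext == ".tsx" then "typescript"
  else if ext == ".go" then "go"
  else if ext == ".rs" then "rust"
  else if ext == ".java" then "java"
  else if ext == ".c" then "c"
  else if ext == ".cpp" then "cpp"
  else if ext == ".h" then "c"
  else if ext == ".hpp" then "cpp"
  else if ext == ".rb" then "ruby"
  else if ext == ".php" then "php"
  else if ext == ".lua" then "lua"
  else if ext == ".sh" then "bash"
  else if ext == ".bash" then "bash"
  else if ext == ".zsh" then "zsh"
  else if ext == ".sql" then "sql"
  else if ext == ".html" then "html"
  else if ext == ".css" then "css"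
  else if ext == ".json" then "json"
  else if ext == ".yaml" then "yaml"
  else if ext == ".yml" then "yaml"
  else if ext == ".md" then "markdown"
  else if ext == ".toml" then "toml"
  else "text"

-- idx = uri.rfind("."); if idx == -1: "text" else pvLang(uri[idx:])
-- (uri[idx:] with idx ≥ 0 is PySem slice with lower bound idx, no upper bound — exact)
def get_language_from_uri_py_alt (uri : String) : String :=
  let idx := PySem.Str.rfind uri "."
  if idx = -1 then "text"
  else pvLang (String.ofList (PySem.List.slice uri.toList (some idx) none))

-- ===== PRECONDITION & SPEC =====
def Spec_get_language_from_uri_py (uri : String) (out : String) : Prop := out = get_language_from_uri_py_alt uri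
instance (uri : String) (out : String) : Decidable (Spec_get_language_from_uri_py uri out) := by unfold Spec_get_language_from_uri_py; infer_instance

-- ===== CLAIM (what is proved, stated in full; the proofs are below) =====
def Claim_equal_get_language_from_uri_py : Prop := ∀ (uri : String), Dom_get_language_from_uri_py uri → Spec_get_language_from_uri_py uri (get_language_from_uri_py uri)

-- ===== LEMMAS AND PROOFS =====

-- the last-dot suffix of s (meaningful when '.' ∈ s)
def pvSufx (s : List Char) : List Char := '.' :: (s.reverse.takeWhile (· ≠ '.')).reverse

-- s with a dot splits (from the right) at its last dot
theorem pvSplit_rev (r : List Char) (h : '.' ∈ r) :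
    ∃ t, r = r.takeWhile (· ≠ '.') ++ '.' :: t := by
  induction r with
  | nil => simp at h
  | cons c rest ih =>
      by_cases hc : c = '.'
      · exact ⟨rest, by simp [hc, List.takeWhile]⟩
      · obtain ⟨t, ht⟩ := ih (by cases List.mem_cons.mp h with
          | inl hx => exact absurd hx.symm hc
          | inr hx => exact hx)
        refine ⟨t, ?_⟩
        simp only [ne_eq, decide_not] at ht
        simp [hc]
        exact ht

-- a string containing a dot splits as p ++ '.' :: q with q dot-free
theorem pvDecomp (s : List Char) (h : '.' ∈ s) :
    ∃ p q, s = p ++ '.' :: q ∧ '.' ∉ q ∧ pvSufx s = '.' :: q := by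
  obtain ⟨t, ht⟩ := pvSplit_rev s.reverse (by simpa using h)
  have hs : s = t.reverse ++ '.' :: (s.reverse.takeWhile (· ≠ '.')).reverse := by
    have := congrArg List.reverse ht
    simp only [List.reverse_reverse] at this
    conv_lhs => rw [this]
    simp
  refine ⟨t.reverse, (s.reverse.takeWhile (· ≠ '.')).reverse, hs, ?_, rfl⟩
  intro hmem
  have := List.mem_takeWhile_imp (List.mem_reverse.mp hmem)
  simp at this

-- when s has a dot, pvSufx s is a suffix of s
theorem pvSufx_suffix (s : List Char) (h : '.' ∈ s) : pvSufx s <:+ s := by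
  obtain ⟨p, q, hp, _, hq⟩ := pvDecomp s h
  exact ⟨p, by rw [hq, hp]⟩

-- a good key ('.'-headed, dot-free tail) is a suffix of s iff it IS the last-dot suffix
theorem pvKey_iff (s w : List Char) (hw : '.' ∉ w) :
    ('.' :: w) <:+ s ↔ ('.' ∈ s ∧ pvSufx s = '.' :: w) := by
  constructor
  · rintro ⟨p, hp⟩
    have hdot : '.' ∈ s := by rw [← hp]; simp
    refine ⟨hdot, ?_⟩
    have hrev : s.reverse = w.reverse ++ '.' :: p.reverse := by
      rw [← hp]; simp
    have htw : s.reverse.takeWhile (· ≠ '.') = w.reverse := by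
      rw [hrev, List.takeWhile_append_of_pos
        (by intro a ha; simp; rintro rfl; exact hw (by simpa using ha))]
      simp [List.takeWhile]
    simp only [ne_eq, decide_not] at htw
    simp [pvSufx, htw]
  · rintro ⟨hdot, hsuf⟩
    rw [← hsuf]; exact pvSufx_suffix s hdot

-- A's scan over good keys equals one dict lookup on the last-dot suffix
theorem pvScan_eq (uri : String) (L : List (String × String))
    (hL : ∀ kv ∈ L, kv.1.toList.head? = some '.' ∧ '.' ∉ kv.1.toList.tail) :
    pvAScan uri L =
      if '.' ∈ uri.toList then
        (PySem.Dict.mk L : PySem.Dict String String).getD (String.ofList (pvSufx uri.toList)) "text"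
      else "text" := by
  induction L with
  | nil =>
      rw [pvAScan]
      split
      · simp [PySem.Dict.getD_eq_get?_getD, PySem.Dict.get?]
      · rfl
  | cons kv rest ih =>
      obtain ⟨k, v⟩ := kv
      obtain ⟨hk1, hk2⟩ := hL (k, v) (by simp)
      obtain ⟨w, hk⟩ : ∃ w, k.toList = '.' :: w := by
        cases hkc : k.toList with
        | nil => rw [hkc] at hk1; simp at hk1
        | cons a w => rw [hkc] at hk1; simp at hk1; exact ⟨w, by rw [hk1]⟩
      have hwdot : '.' ∉ w := by rw [hk] at hk2; simpa using hk2
      have hrest := fun kv h => hL kv (List.mem_cons_of_mem _ h)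
      have hgetD : ∀ x : String,
          (PySem.Dict.mk ((k, v) :: rest) : PySem.Dict String String).getD x "text"
            = if k == x then v else (PySem.Dict.mk rest : PySem.Dict String String).getD x "text" := by
        intro x
        simp only [PySem.Dict.getD_eq_get?_getD, PySem.Dict.get?_mk_cons]
        split <;> simp
      have hends : PySem.Str.endswith uri k = true ↔ k.toList <:+ uri.toList := by
        simp [PySem.Chars.endswith_iff]
      by_cases he : PySem.Str.endswith uri k = true
      · have hsx := (pvKey_iff uri.toList w hwdot).mp (hk ▸ hends.mp he)
        have hkx : (k == String.ofList (pvSufx uri.toList)) = true := by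
          simp only [beq_iff_eq]
          apply String.toList_inj.mp
          simp [hk, hsx.2]
        rw [pvAScan, if_pos he]
        simp [hsx.1, hgetD, hkx]
      · have hns : ¬ ('.' ∈ uri.toList ∧ pvSufx uri.toList = '.' :: w) := by
          intro hx
          exact he (hends.mpr (hk ▸ (pvKey_iff uri.toList w hwdot).mpr hx))
        rw [pvAScan, if_neg he, ih hrest]
        by_cases hdot : '.' ∈ uri.toList
        · have hne : pvSufx uri.toList ≠ '.' :: w := fun hx => hns ⟨hdot, hx⟩
          have hkx : (k == String.ofList (pvSufx uri.toList)) = false := by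
            simp only [beq_eq_false_iff_ne, ne_eq]
            intro hkeq
            exact hne (by rw [← hk, hkeq]; simp)
          simp [hdot, hgetD, hkx]
        · simp [hdot]

-- ['.'] is a prefix of s.drop i iff s[i] is '.'
theorem pvPrefix_singleton (s : List Char) (i : Nat) :
    (['.'] <+: s.drop i) ↔ s[i]? = some '.' := by
  rw [show s[i]? = (s.drop i).head? by simp [List.head?_drop]]
  cases s.drop i with
  | nil => simp
  | cons a t => simp [List.cons_prefix_cons, eq_comm]

-- rfind.go returns -1 when no index ≤ j holds '.'
theorem pvGo_none (s : List Char) (j : Nat)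
    (h : ∀ i, i ≤ j → s[i]? ≠ some '.') : PySem.Chars.rfind.go s ['.'] j = -1 := by
  induction j with
  | zero =>
      have h0 : ¬ (['.'] <+: s) := by
        simpa using (pvPrefix_singleton s 0).not.mpr (h 0 le_rfl)
      rw [PySem.Chars.rfind.go]
      simp [List.isPrefixOf_iff_prefix, h0]
  | succ m ih =>
      have hnp : ¬ (['.'] <+: s.drop (m+1)) :=
        (pvPrefix_singleton s (m+1)).not.mpr (h (m+1) le_rfl)
      rw [PySem.Chars.rfind.go]
      simp only [List.isPrefixOf_iff_prefix, hnp,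
        if_false]
      exact ih (fun i hi => h i (Nat.le_succ_of_le hi))

-- rfind.go returns the highest index m ≤ j holding '.'
theorem pvGo_found (s : List Char) (m j : Nat)
    (hm : s[m]? = some '.') (hhi : ∀ i, m < i → i ≤ j → s[i]? ≠ some '.') (hmj : m ≤ j) :
    PySem.Chars.rfind.go s ['.'] j = (m : Int) := by
  induction j with
  | zero =>
      have : m = 0 := Nat.le_zero.mp hmj
      subst this
      have h0 : ['.'] <+: s := by simpa using (pvPrefix_singleton s 0).mpr hm
      rw [PySem.Chars.rfind.go]
      simp [List.isPrefixOf_iff_prefix, h0]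
  | succ n ih =>
      rw [PySem.Chars.rfind.go]
      by_cases he : m = n + 1
      · subst he
        simp [List.isPrefixOf_iff_prefix, (pvPrefix_singleton s (n+1)).mpr hm]
      · have hmn : m ≤ n := Nat.lt_succ_iff.mp (Nat.lt_of_le_of_ne hmj he)
        have hnp : ¬ (['.'] <+: s.drop (n+1)) :=
          (pvPrefix_singleton s (n+1)).not.mpr (hhi (n+1) (Nat.lt_succ_of_le hmn) le_rfl)
        simp only [List.isPrefixOf_iff_prefix, hnp,
          if_false, reduceIte]
        exact ih (fun i h1 h2 => hhi i h1 (Nat.le_succ_of_le h2)) hmn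

-- B computed in closed form
theorem pvAlt_eq (uri : String) :
    get_language_from_uri_py_alt uri =
      if '.' ∈ uri.toList then pvLang (String.ofList (pvSufx uri.toList)) else "text" := by
  rw [get_language_from_uri_py_alt]
  have hr : PySem.Str.rfind uri "." = PySem.Chars.rfind uri.toList ['.'] := by
    simp [PySem.Str.rfind_eq]
  by_cases hdot : '.' ∈ uri.toList
  · obtain ⟨p, q, hp, hq, hsuf⟩ := pvDecomp uri.toList hdot
    have hgm : uri.toList[p.length]? = some '.' := by
      rw [hp]; simp
    have hhi : ∀ i, p.length < i → i ≤ uri.toList.length → uri.toList[i]? ≠ some '.' := by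
      intro i h1 _ hc
      rw [hp, List.getElem?_append_right (by omega)] at hc
      rw [show i - p.length = (i - p.length - 1) + 1 by omega] at hc
      simp only [List.getElem?_cons_succ] at hc
      exact hq (List.mem_of_getElem? hc)
    have hfind : PySem.Chars.rfind uri.toList ['.'] = (p.length : Int) := by
      rw [PySem.Chars.rfind]
      exact pvGo_found uri.toList p.length uri.toList.length hgm hhi
        (by rw [hp]; simp)
    rw [hr, hfind]
    have hne : ((p.length : Int)) ≠ -1 := by omega
    rw [if_neg hne, if_pos hdot]
    congr 2
    rw [PySem.List.slice_from_natCast, hsuf, hp]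
    simp
  · have hfind : PySem.Chars.rfind uri.toList ['.'] = -1 := by
      rw [PySem.Chars.rfind]
      apply pvGo_none
      intro i _ hc
      exact hdot (List.mem_of_getElem? hc)
    rw [hr, hfind, if_pos rfl, if_neg hdot]

-- the dict lookup A reduces to equals Source B's decision chain, for every key
theorem pvGetD_eq_pvLang (x : String) : pvAMap.getD x "text" = pvLang x := by
  by_cases h1 : x = ".py"
  · subst h1; rfl
  by_cases h2 : x = ".js"
  · subst h2; rfl
  by_cases h3 : x = ".ts"
  · subst h3; rfl
  by_cases h4 : x = ".jsx"
  · subst h4; rfl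
  by_cases h5 : x = ".tsx"
  · subst h5; rfl
  by_cases h6 : x = ".go"
  · subst h6; rfl
  by_cases h7 : x = ".rs"
  · subst h7; rfl
  by_cases h8 : x = ".java"
  · subst h8; rfl
  by_cases h9 : x = ".c"
  · subst h9; rfl
  by_cases h10 : x = ".cpp"
  · subst h10; rfl
  by_cases h11 : x = ".h"
  · subst h11; rfl
  by_cases h12 : x = ".hpp"
  · subst h12; rfl
  by_cases h13 : x = ".rb"
  · subst h13; rfl
  by_cases h14 : x = ".php"
  · subst h14; rfl
  by_cases h15 : x = ".lua"
  · subst h15; rfl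
  by_cases h16 : x = ".sh"
  · subst h16; rfl
  by_cases h17 : x = ".bash"
  · subst h17; rfl
  by_cases h18 : x = ".zsh"
  · subst h18; rfl
  by_cases h19 : x = ".sql"
  · subst h19; rfl
  by_cases h20 : x = ".html"
  · subst h20; rfl
  by_cases h21 : x = ".css"
  · subst h21; rfl
  by_cases h22 : x = ".json"
  · subst h22; rfl
  by_cases h23 : x = ".yaml"
  · subst h23; rfl
  by_cases h24 : x = ".yml"
  · subst h24; rfl
  by_cases h25 : x = ".md"
  · subst h25; rfl
  by_cases h26 : x = ".toml"
  · subst h26; rfl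
  simp [pvLang, pvAMap, PySem.Dict.getD_eq_get?_getD, PySem.Dict.get?_mk_cons, PySem.Dict.get?, h1, h2, h3, h4, h5, h6, h7, h8, h9, h10, h11, h12, h13, h14, h15, h16, h17, h18, h19, h20, h21, h22, h23, h24, h25, h26, Ne.symm h1, Ne.symm h2, Ne.symm h3, Ne.symm h4, Ne.symm h5, Ne.symm h6, Ne.symm h7, Ne.symm h8, Ne.symm h9, Ne.symm h10, Ne.symm h11, Ne.symm h12, Ne.symm h13, Ne.symm h14, Ne.symm h15, Ne.symm h16, Ne.symm h17, Ne.symm h18, Ne.symm h19, Ne.symm h20, Ne.symm h21, Ne.symm h22, Ne.symm h23, Ne.symm h24, Ne.symm h25, Ne.symm h26]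

-- ===== VERDICT (by name: the statement is the Claim_ definition above) =====
theorem get_language_from_uri_py_spec : Claim_equal_get_language_from_uri_py := by
  intro uri _
  unfold Spec_get_language_from_uri_py
  rw [pvAlt_eq, get_language_from_uri_py]
  rw [pvScan_eq uri pvAMap.items (by decide)]
  split
  · exact pvGetD_eq_pvLang _
  · rfl
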